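-- pv_equiv track=rewrite | github.com/jjjvvvvv/JaxWatch | backend/tools/project_scoring.py | _calculate_board_escalation_score
-- ===== SOURCE A (Python) =====
-- from typing import Dict, List, Tuple, Optional, Any
--
-- def _calculate_board_escalation_score(project: Dict[str, Any]) -> int:
--     """Calculate board hierarchy score."""
--     sources = set()
--     for mention in project.get('mentions', []):
--         source = mention.get('source')
--         if source:
--             sources.add(source)
--
--     # Future: add city_council = 15 points
--     if any(source in ['dia_board', 'dia_resolutions'] for source in sources):
--         return 10
--     elif 'dia_ddrb' in sources:
--         return 5
--     else:
--         return 5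
-- ===== SOURCE B (Python) =====
-- from typing import Dict, Any
--
-- def _calculate_board_escalation_score(project: Dict[str, Any]) -> int:
--     """Calculate board hierarchy score (single early-exit pass, no set)."""
--     for mention in project.get('mentions', []):
--         if mention.get('source') in ('dia_board', 'dia_resolutions'):
--             return 10
--     return 5
-- ===== Notes on version B (the rewrite author's own statement) =====
-- stated objective: simpler
-- what changed: Replaced A's two-pass build-a-set-then-scan-it (plus a redundant 'dia_ddrb' branch that also returns 5) with a single early-exit loop over the mentions with no auxiliary container.
import Mathlib
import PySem

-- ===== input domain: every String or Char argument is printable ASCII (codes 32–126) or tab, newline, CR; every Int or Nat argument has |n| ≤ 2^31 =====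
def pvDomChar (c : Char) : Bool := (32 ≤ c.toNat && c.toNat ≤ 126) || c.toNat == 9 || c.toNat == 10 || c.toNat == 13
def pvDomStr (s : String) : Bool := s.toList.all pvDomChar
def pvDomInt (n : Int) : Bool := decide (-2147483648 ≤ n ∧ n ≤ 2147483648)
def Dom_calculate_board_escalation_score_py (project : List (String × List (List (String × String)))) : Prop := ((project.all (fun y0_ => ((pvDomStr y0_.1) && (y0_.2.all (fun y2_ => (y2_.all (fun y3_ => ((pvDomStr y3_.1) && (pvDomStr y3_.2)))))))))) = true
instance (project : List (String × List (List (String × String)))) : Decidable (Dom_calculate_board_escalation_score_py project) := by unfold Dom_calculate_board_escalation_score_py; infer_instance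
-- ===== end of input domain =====

-- B replaces A's build-a-set-then-scan-it (and its redundant 'dia_ddrb' branch, which also
-- returns 5) with a single early-exit pass over the mentions; objective: simpler.

-- ===== PORT A =====
-- step of A's first loop: 'source = mention.get("source"); if source: sources.add(source)'
def pvStepA (acc : PySem.Set String) (m : List (String × String)) : PySem.Set String :=
  match PySem.Dict.get? (PySem.Dict.mk m) "source" with
  | some src => if src ≠ "" then PySem.Set.add acc src else acc
  | none => acc

def calculate_board_escalation_score_py (project : List (String × List (List (String × String)))) : Int :=
  let sources : PySem.Set String :=
    (PySem.Dict.getD (PySem.Dict.mk project) "mentions" []).foldl pvStepA PySem.Set.empty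
  -- any(source in ['dia_board','dia_resolutions'] for source in sources): order-independent over the set
  if sources.any (fun s => ["dia_board", "dia_resolutions"].contains s) then 10
  else if PySem.Set.contains sources "dia_ddrb" then 5
  else 5

-- ===== PORT B =====
-- the early-exit 'for mention in …: if mention.get("source") in (…): return 10' loop
def pvLoopB : List (List (String × String)) → Int
  | [] => 5
  | m :: rest =>
    if [some "dia_board", some "dia_resolutions"].contains (PySem.Dict.get? (PySem.Dict.mk m) "source") then 10
    else pvLoopB rest

def calculate_board_escalation_score_py_alt (project : List (String × List (List (String × String)))) : Int :=
  pvLoopB (PySem.Dict.getD (PySem.Dict.mk project) "mentions" [])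

-- ===== PRECONDITION & SPEC =====
def Spec_calculate_board_escalation_score_py (project : List (String × List (List (String × String)))) (out : Int) : Prop := out = calculate_board_escalation_score_py_alt project
instance (project : List (String × List (List (String × String)))) (out : Int) : Decidable (Spec_calculate_board_escalation_score_py project out) := by unfold Spec_calculate_board_escalation_score_py; infer_instance

-- ===== CLAIM (what is proved, stated in full; the proofs are below) =====
def Claim_equal_calculate_board_escalation_score_py : Prop := ∀ (project : List (String × List (List (String × String)))), Dom_calculate_board_escalation_score_py project → Spec_calculate_board_escalation_score_py project (calculate_board_escalation_score_py project)

-- ===== LEMMAS AND PROOFS =====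

lemma pv_any_add (acc : PySem.Set String) (src : String) (tgt : String → Bool) :
    (PySem.Set.add acc src).any tgt = (acc.any tgt || tgt src) := by
  by_cases h : src ∈ acc
  · have hc : PySem.Set.contains acc src = true := by simpa [PySem.Set.contains_iff] using h
    simp only [PySem.Set.add, hc, if_pos]
    by_cases ht : tgt src = true
    · have ha : List.any acc tgt = true := List.any_eq_true.mpr ⟨src, h, ht⟩
      simp [ha, ht]
    · simp [ht]
  · simp [PySem.Set.add, h, List.any_append]

lemma pv_any_step (acc : PySem.Set String) (m : List (String × String)) :
    (pvStepA acc m).any (fun s => ["dia_board", "dia_resolutions"].contains s) =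
      (acc.any (fun s => ["dia_board", "dia_resolutions"].contains s) ||
        [some "dia_board", some "dia_resolutions"].contains (PySem.Dict.get? (PySem.Dict.mk m) "source")) := by
  unfold pvStepA
  cases hg : PySem.Dict.get? (PySem.Dict.mk m) "source" with
  | none => simp
  | some src =>
    by_cases he : src = ""
    · subst he; simp
    · dsimp only
      rw [if_pos (by exact he), pv_any_add]
      have hc : [some "dia_board", some "dia_resolutions"].contains (some src) =
          ["dia_board", "dia_resolutions"].contains src := by
        simp
      rw [hc]

lemma pv_loop_eq (ms : List (List (String × String))) (acc : PySem.Set String) :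
    (if (ms.foldl pvStepA acc).any (fun s => ["dia_board", "dia_resolutions"].contains s)
      then (10 : Int) else 5) =
    (if acc.any (fun s => ["dia_board", "dia_resolutions"].contains s)
      then (10 : Int) else pvLoopB ms) := by
  induction ms generalizing acc with
  | nil => simp [pvLoopB]
  | cons m rest ih =>
    rw [List.foldl_cons, ih, pv_any_step]
    cases h1 : List.any acc (fun s => ["dia_board", "dia_resolutions"].contains s) <;>
      simp [pvLoopB]

-- ===== VERDICT (by name: the statement is the Claim_ definition above) =====
theorem calculate_board_escalation_score_py_spec : Claim_equal_calculate_board_escalation_score_py := by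
  intro project _
  unfold Spec_calculate_board_escalation_score_py calculate_board_escalation_score_py
    calculate_board_escalation_score_py_alt
  have h := pv_loop_eq (PySem.Dict.getD (PySem.Dict.mk project) "mentions" []) PySem.Set.empty
  have h0 : (List.any (PySem.Set.empty : PySem.Set String)
      fun s => ["dia_board", "dia_resolutions"].contains s) = false := rfl
  rw [h0] at h
  simp only [Bool.false_eq_true, if_false] at h
  dsimp only
  rw [← h]
  split_ifs <;> rfl
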